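-- pv_equiv track=rewrite | github.com/tdempsey/lotto_prediction_system_250717 | lot_cover_1000.py | count_sequential_numbers
-- ===== SOURCE A (Python) =====
-- def count_sequential_numbers(combination):
--     """Count sequential number pairs and triplets"""
--     sorted_combo = sorted(combination)
--     seq2_count = 0
--     seq3_count = 0
--
--     # Count sequential pairs
--     for i in range(len(sorted_combo) - 1):
--         if sorted_combo[i+1] == sorted_combo[i] + 1:
--             seq2_count += 1
--
--     # Count sequential triplets
--     for i in range(len(sorted_combo) - 2):
--         if (sorted_combo[i+1] == sorted_combo[i] + 1 and
--             sorted_combo[i+2] == sorted_combo[i] + 2):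
--             seq3_count += 1
--
--     return seq2_count, seq3_count
-- ===== SOURCE B (Python) =====
-- def count_sequential_numbers(combination):
--     """Count sequential number pairs and triplets"""
--     s = sorted(combination)
--     seq2_count = 0
--     seq3_count = 0
--     prev = False
--     for a, b in zip(s, s[1:]):
--         cur = (b == a + 1)
--         if cur:
--             seq2_count += 1
--             if prev:
--                 seq3_count += 1
--         prev = cur
--     return seq2_count, seq3_count
-- ===== Notes on version B (the rewrite author's own statement) =====
-- stated objective: alternative
-- what changed: Replaces A's two independent index-based passes (re-checking s[i+2]==s[i]+2 for triplets) by one pass over adjacent pairs that carries only the previous pair's sequential flag, deriving triplet counts from two consecutive pair flags.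
import Mathlib
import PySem

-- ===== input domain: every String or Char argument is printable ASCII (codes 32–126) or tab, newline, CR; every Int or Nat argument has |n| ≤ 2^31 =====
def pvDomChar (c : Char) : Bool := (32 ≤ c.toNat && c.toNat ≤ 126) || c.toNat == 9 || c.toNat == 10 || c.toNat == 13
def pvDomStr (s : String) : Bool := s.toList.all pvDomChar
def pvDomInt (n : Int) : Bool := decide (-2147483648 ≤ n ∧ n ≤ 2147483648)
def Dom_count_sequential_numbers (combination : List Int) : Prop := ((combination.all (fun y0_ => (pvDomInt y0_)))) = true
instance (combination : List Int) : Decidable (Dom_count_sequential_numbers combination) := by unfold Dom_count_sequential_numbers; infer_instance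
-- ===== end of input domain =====

-- B replaces A's two independent index passes by one pass over adjacent pairs carrying the
-- previous pair's sequential flag (alternative decomposition; return value only, no mutation).

-- ===== PORT A =====
def count_sequential_numbers (combination : List Int) : Int × Int :=
  let sorted_combo := PySem.List.sorted combination (fun x => x)
  let seq2_count : Int :=
    (PySem.List.pyRange 0 ((sorted_combo.length : Int) - 1) 1).foldl
      (fun acc i =>
        if PySem.List.pyGetD sorted_combo (i + 1) 0 = PySem.List.pyGetD sorted_combo i 0 + 1
        then acc + 1 else acc) 0
  let seq3_count : Int :=
    (PySem.List.pyRange 0 ((sorted_combo.length : Int) - 2) 1).foldl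
      (fun acc i =>
        if PySem.List.pyGetD sorted_combo (i + 1) 0 = PySem.List.pyGetD sorted_combo i 0 + 1 ∧
           PySem.List.pyGetD sorted_combo (i + 2) 0 = PySem.List.pyGetD sorted_combo i 0 + 2
        then acc + 1 else acc) 0
  (seq2_count, seq3_count)

-- ===== PORT B =====
-- body of Source B's single loop over zip(s, s[1:]); state is (seq2, seq3, prev)
def csnBody (st : Int × Int × Bool) (p : Int × Int) : Int × Int × Bool :=
  let cur := decide (p.2 = p.1 + 1)
  (if cur then st.1 + 1 else st.1,
   if cur && st.2.2 then st.2.1 + 1 else st.2.1,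
   cur)

def count_sequential_numbers_alt (combination : List Int) : Int × Int :=
  let s := PySem.List.sorted combination (fun x => x)
  let r := (s.zip (PySem.List.slice s (some 1) none)).foldl csnBody (0, 0, false)
  (r.1, r.2.1)

-- ===== PRECONDITION & SPEC =====
def Spec_count_sequential_numbers (combination : List Int) (out : Int × Int) : Prop := out = count_sequential_numbers_alt combination
instance (combination : List Int) (out : Int × Int) : Decidable (Spec_count_sequential_numbers combination out) := by unfold Spec_count_sequential_numbers; infer_instance

-- ===== CLAIM (what is proved, stated in full; the proofs are below) =====
def Claim_equal_count_sequential_numbers : Prop := ∀ (combination : List Int), Dom_count_sequential_numbers combination → Spec_count_sequential_numbers combination (count_sequential_numbers combination)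

-- ===== LEMMAS AND PROOFS =====

-- number of adjacent ascending-by-1 pairs of a list
def pairCnt : List Int → Int
  | a :: b :: t => (if b = a + 1 then 1 else 0) + pairCnt (b :: t)
  | _ => 0

-- number of positions with s[i+1]=s[i]+1 ∧ s[i+2]=s[i]+2 (A's triplet condition)
def tripCnt : List Int → Int
  | a :: b :: c :: t => (if b = a + 1 ∧ c = a + 2 then 1 else 0) + tripCnt (b :: c :: t)
  | _ => 0

-- is the first adjacent pair ascending-by-1?
def hd2 : List Int → Bool
  | a :: b :: _ => decide (b = a + 1)
  | _ => false

lemma apairs : ∀ (s : List Int) (acc : Int),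
    (List.range (s.length - 1)).foldl
      (fun a k => if s.getD (k + 1) 0 = s.getD k 0 + 1 then a + 1 else a) acc
    = acc + pairCnt s := by
  intro s
  induction s with
  | nil => intro acc; simp [pairCnt]
  | cons x t ih =>
    intro acc
    match t with
    | [] => simp [pairCnt]
    | y :: t2 =>
      have hlen : (x :: y :: t2).length - 1 = ((y :: t2).length - 1) + 1 := by
        simp
      rw [hlen, List.range_succ_eq_map, List.foldl_cons, List.foldl_map]
      simp only [List.getD_cons_succ, List.getD_cons_zero, Nat.succ_eq_add_one] at ih ⊢
      rw [ih]
      show _ = acc + pairCnt (x :: y :: t2)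
      rw [pairCnt]
      by_cases h : y = x + 1 <;> simp [h] <;> ring

lemma atrips : ∀ (s : List Int) (acc : Int),
    (List.range (s.length - 2)).foldl
      (fun a k => if s.getD (k + 1) 0 = s.getD k 0 + 1 ∧ s.getD (k + 2) 0 = s.getD k 0 + 2
                  then a + 1 else a) acc
    = acc + tripCnt s := by
  intro s
  induction s with
  | nil => intro acc; simp [tripCnt]
  | cons x t ih =>
    intro acc
    match t with
    | [] => simp [tripCnt]
    | [y] => simp [tripCnt]
    | y :: c :: t2 =>
      have hlen : (x :: y :: c :: t2).length - 2 = ((y :: c :: t2).length - 2) + 1 := by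
        simp
      rw [hlen, List.range_succ_eq_map, List.foldl_cons, List.foldl_map]
      simp only [List.getD_cons_succ, List.getD_cons_zero, Nat.succ_eq_add_one] at ih ⊢
      rw [ih]
      show _ = acc + tripCnt (x :: y :: c :: t2)
      rw [tripCnt]
      by_cases h : y = x + 1 ∧ c = x + 2 <;> simp [h] <;> ring

lemma bloop : ∀ (s : List Int) (s2 s3 : Int) (prev : Bool),
    ((s.zip s.tail).foldl csnBody (s2, s3, prev)).1 = s2 + pairCnt s ∧
    ((s.zip s.tail).foldl csnBody (s2, s3, prev)).2.1
      = s3 + tripCnt s + (if prev && hd2 s then 1 else 0) := by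
  intro s
  induction s with
  | nil => intro s2 s3 prev; simp [pairCnt, tripCnt, hd2]
  | cons a t ih =>
    intro s2 s3 prev
    match t with
    | [] => simp [pairCnt, tripCnt, hd2]
    | b :: t2 =>
      have hzip : ((a :: b :: t2).zip (a :: b :: t2).tail)
          = (a, b) :: ((b :: t2).zip (b :: t2).tail) := by
        simp [List.zip]
      rw [hzip, List.foldl_cons]
      have hstep : csnBody (s2, s3, prev) (a, b)
          = (if decide (b = a + 1) then s2 + 1 else s2,
             if decide (b = a + 1) && prev then s3 + 1 else s3,
             decide (b = a + 1)) := by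
        simp [csnBody]
      rw [hstep]
      obtain ⟨ih1, ih2⟩ := ih (if decide (b = a + 1) then s2 + 1 else s2)
        (if decide (b = a + 1) && prev then s3 + 1 else s3) (decide (b = a + 1))
      refine ⟨?_, ?_⟩
      · rw [ih1, pairCnt]
        by_cases h : b = a + 1 <;> simp [h] <;> ring
      · rw [ih2]
        match t2 with
        | [] =>
          rw [show tripCnt (a :: b :: []) = 0 from rfl,
              show tripCnt (b :: []) = 0 from rfl]
          by_cases h : b = a + 1 <;> by_cases hp : prev = true <;>
            simp [hd2, h, hp] <;> ring
        | c :: t3 =>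
          rw [tripCnt]
          by_cases h : b = a + 1 <;> by_cases hc : c = b + 1 <;>
            by_cases hp : prev = true <;>
            simp [hd2, h, hc, hp] <;> (try split_ifs) <;>
            first | (exfalso ; omega) | ring | linarith | simp_all

-- ===== VERDICT (by name: the statement is the Claim_ definition above) =====
theorem count_sequential_numbers_spec : Claim_equal_count_sequential_numbers := by
  intro combination _
  unfold Spec_count_sequential_numbers count_sequential_numbers count_sequential_numbers_alt
  set s := PySem.List.sorted combination (fun x => x) with hs
  simp only [PySem.List.slice_from_one, PySem.List.pyRange_one]
  rw [List.foldl_map, List.foldl_map]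
  have h1 : ((s.length : Int) - 1 - 0).toNat = s.length - 1 := by omega
  have h2 : ((s.length : Int) - 2 - 0).toNat = s.length - 2 := by omega
  rw [h1, h2]
  obtain ⟨b1, b2⟩ := bloop s 0 0 false
  rw [b1, b2]
  simp only [zero_add, Bool.false_and, if_neg (by simp : ¬ (false = true)), add_zero]
  simp only [Prod.mk.injEq]
  refine ⟨?_, ?_⟩
  · rw [← zero_add (pairCnt s), ← apairs s 0]
    congr 1
    funext a k
    rw [show ((k : Int) + 1) = (((k + 1 : Nat)) : Int) by push_cast; ring]
    simp only [PySem.List.pyGetD_natCast]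
  · rw [← zero_add (tripCnt s), ← atrips s 0]
    congr 1
    funext a k
    rw [show ((k : Int) + 1) = (((k + 1 : Nat)) : Int) by push_cast; ring,
        show ((k : Int) + 2) = (((k + 2 : Nat)) : Int) by push_cast; ring]
    simp only [PySem.List.pyGetD_natCast]
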